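-- pv_equiv track=rewrite | github.com/kamilludwinski/aoc | 2015/8/main.py | _encode_literal
-- ===== SOURCE A (Python) =====
-- def _encode_literal(line: str) -> str:
--     parts = ['"']
--
--     for c in line:
--         if c == "\\":
--             parts.append("\\\\")
--         elif c == '"':
--             parts.append('\\"')
--         else:
--             parts.append(c)
--
--     parts.append('"')
--
--     return "".join(parts)
-- ===== SOURCE B (Python) =====
-- def _encode_literal(line: str) -> str:
--     return '"' + line.replace("\\", "\\\\").replace('"', '\\"') + '"'
-- ===== Notes on version B (the rewrite author's own statement) =====
-- stated objective: idiomatic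
-- what changed: Replaces the per-character branching loop with two chained whole-string str.replace passes (backslashes doubled first, then quotes escaped) and plain concatenation of the surrounding quotes.
import Mathlib
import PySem

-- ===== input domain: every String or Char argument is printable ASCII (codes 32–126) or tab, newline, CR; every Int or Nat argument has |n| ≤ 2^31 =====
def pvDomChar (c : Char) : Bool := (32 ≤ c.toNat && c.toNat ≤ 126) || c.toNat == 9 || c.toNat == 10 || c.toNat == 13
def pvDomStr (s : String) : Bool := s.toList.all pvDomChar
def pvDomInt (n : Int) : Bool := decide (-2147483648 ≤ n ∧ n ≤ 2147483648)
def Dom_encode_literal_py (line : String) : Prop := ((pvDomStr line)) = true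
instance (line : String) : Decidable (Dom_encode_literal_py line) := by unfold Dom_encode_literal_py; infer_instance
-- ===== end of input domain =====

-- B replaces A's per-character branching loop with two chained whole-string replaces (backslashes first), then wraps in quotes: idiomatic, same cost.

-- ===== PORT A =====
-- A: builds a list of string parts character by character, then joins.
def encode_literal_py (line : String) : String :=
  let parts : List String :=
    line.toList.foldl (fun parts c =>
      if c = '\\' then parts ++ ["\\\\"]
      else if c = '"' then parts ++ ["\\\""]
      else parts ++ [String.ofList [c]]) ["\""]
  PySem.Str.join "" (parts ++ ["\""])

-- ===== PORT B =====
-- B: two chained whole-string replaces (backslashes first), then wrap in quotes.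
def encode_literal_py_alt (line : String) : String :=
  "\"" ++ PySem.Str.replace (PySem.Str.replace line "\\" "\\\\") "\"" "\\\"" ++ "\""

-- ===== PRECONDITION & SPEC =====
def Spec_encode_literal_py (line : String) (out : String) : Prop := out = encode_literal_py_alt line
instance (line : String) (out : String) : Decidable (Spec_encode_literal_py line out) := by unfold Spec_encode_literal_py; infer_instance

-- ===== CLAIM (what is proved, stated in full; the proofs are below) =====
def Claim_equal_encode_literal_py : Prop := ∀ (line : String), Dom_encode_literal_py line → Spec_encode_literal_py line (encode_literal_py line)

-- ===== LEMMAS AND PROOFS =====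

-- the per-character escaping both programs realise, on code points
def pvEsc (c : Char) : List Char :=
  if c = '\\' then ['\\', '\\'] else if c = '"' then ['\\', '"'] else [c]

-- the same escaping as the string A appends for one character
def pvEscS (c : Char) : String :=
  if c = '\\' then "\\\\" else if c = '"' then "\\\"" else String.ofList [c]

-- replace.go with a single-character pattern is a flatMap (given enough fuel)
theorem pv_go_single (a : Char) (new : List Char) :
    ∀ (l acc : List Char) (fuel : Nat), l.length ≤ fuel →
      PySem.Chars.replace.go [a] new fuel l acc =
        acc.reverse ++ l.flatMap (fun c => if c = a then new else [c]) := by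
  intro l
  induction l with
  | nil =>
      intro acc fuel _
      cases fuel <;> simp [PySem.Chars.replace.go]
  | cons c t ih =>
      intro acc fuel hf
      cases fuel with
      | zero => simp at hf
      | succ fuel =>
          by_cases hc : c = a
          · subst hc
            have hba : ([c].isPrefixOf (c :: t)) = true := by
              simp [List.isPrefixOf]
            simp only [PySem.Chars.replace.go, hba, if_true, List.length_cons,
              List.length_nil, Nat.zero_add, List.drop_succ_cons, List.drop_zero]
            rw [ih (new.reverse ++ acc) fuel (by simpa using hf)]
            simp
          · have hba : ([a].isPrefixOf (c :: t)) = false := by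
              simp [List.isPrefixOf]
              exact fun h => (hc h.symm).elim
            simp only [PySem.Chars.replace.go, hba, Bool.false_eq_true, if_false]
            rw [ih (c :: acc) fuel (by simpa using hf)]
            simp [hc]

theorem pv_replace_single (s : List Char) (a : Char) (new : List Char) :
    PySem.Chars.replace s [a] new = s.flatMap (fun c => if c = a then new else [c]) := by
  have h := pv_go_single a new s [] s.length le_rfl
  simpa [PySem.Chars.replace] using h

-- the two chained replaces compose to pvEsc
theorem pv_two_replaces (l : List Char) :
    ((l.flatMap (fun c => if c = '\\' then ['\\', '\\'] else [c])).flatMap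
        (fun c => if c = '"' then ['\\', '"'] else [c])) = l.flatMap pvEsc := by
  induction l with
  | nil => simp
  | cons c t ih =>
      simp only [List.flatMap_cons, List.flatMap_append, ih, pvEsc]
      split_ifs with h1 h2 <;> simp [*]

-- A's fold appends one escaped part per character
theorem pv_foldA (l : List Char) (parts : List String) :
    l.foldl (fun parts c =>
        if c = '\\' then parts ++ ["\\\\"]
        else if c = '"' then parts ++ ["\\\""]
        else parts ++ [String.ofList [c]]) parts = parts ++ l.map pvEscS := by
  induction l generalizing parts with
  | nil => simp
  | cons c t ih =>
      simp only [List.foldl_cons, List.map_cons]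
      split_ifs with h1 h2 <;> rw [ih] <;> simp [pvEscS, *]

theorem pv_toList_escS (c : Char) : (pvEscS c).toList = pvEsc c := by
  unfold pvEscS pvEsc
  split_ifs <;> simp

theorem pv_intersperse_nil_flatten : ∀ ps : List (List Char),
    (List.intersperse [] ps).flatten = ps.flatten
  | [] => rfl
  | [_] => by simp
  | x :: y :: t => by
      have h : List.intersperse ([] : List Char) (x :: y :: t)
          = x :: [] :: List.intersperse [] (y :: t) := rfl
      rw [h]
      simp only [List.flatten_cons, List.nil_append]
      rw [pv_intersperse_nil_flatten (y :: t)]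
      simp

theorem pv_join_nil_flatten (ps : List (List Char)) :
    PySem.Chars.join [] ps = ps.flatten := by
  simp [PySem.Chars.join, List.intercalate, pv_intersperse_nil_flatten]

theorem pv_tl_empty : "".toList = ([] : List Char) := rfl
theorem pv_tl_bs : "\\".toList = ['\\'] := rfl
theorem pv_tl_bsbs : "\\\\".toList = ['\\', '\\'] := rfl
theorem pv_tl_q : "\"".toList = ['"'] := rfl
theorem pv_tl_bsq : "\\\"".toList = ['\\', '"'] := rfl

theorem pv_flatMap_escS (l : List Char) :
    l.flatMap (fun c => (pvEscS c).toList) = l.flatMap pvEsc := by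
  induction l with
  | nil => rfl
  | cons c t ih => simp [List.flatMap_cons, pv_toList_escS]

theorem pv_toList_A (line : String) :
    (encode_literal_py line).toList = '"' :: line.toList.flatMap pvEsc ++ ['"'] := by
  unfold encode_literal_py
  rw [pv_foldA]
  rw [PySem.Str.toList_join, pv_tl_empty, pv_join_nil_flatten]
  simp only [List.map_append, List.map_cons, List.map_nil, List.flatten_append,
    List.flatten_cons, List.flatten_nil, List.map_map, Function.comp_def, pv_tl_q,
    List.append_nil]
  rw [← List.flatMap_def, pv_flatMap_escS]
  simp

theorem pv_toList_B (line : String) :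
    (encode_literal_py_alt line).toList = '"' :: line.toList.flatMap pvEsc ++ ['"'] := by
  unfold encode_literal_py_alt
  rw [String.toList_append, String.toList_append, PySem.Str.toList_replace,
    PySem.Str.toList_replace, pv_tl_bs, pv_tl_bsbs, pv_tl_q, pv_tl_bsq]
  rw [pv_replace_single, pv_replace_single, pv_two_replaces]
  simp

-- ===== VERDICT (by name: the statement is the Claim_ definition above) =====
theorem encode_literal_py_spec : Claim_equal_encode_literal_py := by
  intro line _
  unfold Spec_encode_literal_py
  have h : (encode_literal_py line).toList = (encode_literal_py_alt line).toList := by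
    rw [pv_toList_A, pv_toList_B]
  exact String.toList_inj.mp h
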